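-- pv_equiv track=rewrite | github.com/Remy9926/python-projects | recursion.py | build_building
-- ===== SOURCE A (Python) =====
-- def build_building(width, height, brick, astring, height2):
--     """Creates a building street object with a specified width, height, and
--         brick recursively. Each step adds the row to an empty string, and if
--         the maximum height is greater than the height of the building,
--         additional whitespaces are added to the string.
--
--     Parameters: width is the width of the building.
--
--         height is the height of the building.
--
--         brick is the string that the building is made up of.
--
--         astring is an empty string that will be returned.
--
--         height2 is the maximum height of all the objects in the original
--             string representation of the street objects.
--
--         Returns: A building street object representation."""
--     if height != height2:
--         astring += " " * width + "\n"
--         return build_building(width, height, brick, astring, height2 - 1)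
--     else:
--         if height == 1:
--             astring += (brick * width)
--             return astring
--         else:
--             astring += (brick * width + "\n")
--             return \
--                 build_building(width, height - 1, brick, astring, height2 - 1)
-- ===== SOURCE B (Python) =====
-- def build_building(width, height, brick, astring, height2):
--     if height < 1 or height > height2:
--         raise ValueError("height must satisfy 1 <= height <= height2")
--     rows = [" " * width] * (height2 - height) + [brick * width] * height
--     return astring + "\n".join(rows)
-- ===== Notes on version B (the rewrite author's own statement) =====
-- stated objective: simpler
-- what changed: Replaces the two-counter tail recursion that accumulates rows one by one into astring with a flat construction of the whole row list (whitespace rows then brick rows) and a single '\n'.join.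
import Mathlib
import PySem

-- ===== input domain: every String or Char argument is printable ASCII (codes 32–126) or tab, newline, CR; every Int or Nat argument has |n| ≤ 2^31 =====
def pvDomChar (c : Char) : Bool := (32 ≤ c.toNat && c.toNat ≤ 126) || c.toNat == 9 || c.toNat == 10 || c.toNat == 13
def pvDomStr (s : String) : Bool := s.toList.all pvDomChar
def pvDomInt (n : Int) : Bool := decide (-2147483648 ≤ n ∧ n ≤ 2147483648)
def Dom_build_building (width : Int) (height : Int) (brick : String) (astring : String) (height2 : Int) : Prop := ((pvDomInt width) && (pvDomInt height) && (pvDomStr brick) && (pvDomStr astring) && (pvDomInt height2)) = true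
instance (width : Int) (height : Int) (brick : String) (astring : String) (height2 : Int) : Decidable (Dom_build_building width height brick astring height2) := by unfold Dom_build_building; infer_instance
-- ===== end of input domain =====

-- B replaces A's two-counter tail recursion by one flat row-list construction plus a single join (objective: simpler).

-- ===== PORT A =====
-- A's recursion does not terminate when height < 1 or height2 < height, so the port carries a fuel
-- counter; Pre_ (1 ≤ height ≤ height2) guarantees fuel height2.toNat is enough and is never hit at 0.
def bbAgo (fuel : Nat) (width : Int) (height : Int) (brick : List Char) (astring : List Char) (height2 : Int) : List Char :=
  match fuel with
  | 0 => astring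
  | Nat.succ f =>
    if height ≠ height2 then
      bbAgo f width height brick (astring ++ PySem.List.pyRepeat [' '] width ++ ['\n']) (height2 - 1)
    else if height = 1 then
      astring ++ PySem.List.pyRepeat brick width
    else
      bbAgo f width (height - 1) brick (astring ++ PySem.List.pyRepeat brick width ++ ['\n']) (height2 - 1)

def build_building (width : Int) (height : Int) (brick : String) (astring : String) (height2 : Int) : String :=
  String.mk (bbAgo height2.toNat width height brick.toList astring.toList height2)

-- ===== PORT B =====
-- On invalid heights (height < 1 or height > height2, excluded by Pre_) Python B raises ValueError;
-- the port returns "" there (never compared: Pre_ excludes those inputs).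
def build_building_alt (width : Int) (height : Int) (brick : String) (astring : String) (height2 : Int) : String :=
  if height < 1 ∨ height > height2 then "" else
  let rows : List (List Char) :=
    PySem.List.pyRepeat [PySem.List.pyRepeat [' '] width] (height2 - height)
      ++ PySem.List.pyRepeat [PySem.List.pyRepeat brick.toList width] height
  String.mk (astring.toList ++ PySem.Chars.join ['\n'] rows)

-- ===== PRECONDITION & SPEC =====
-- Pre_ excludes exactly the inputs on which A recurses forever and raises RecursionError.
def Pre_build_building (width : Int) (height : Int) (brick : String) (astring : String) (height2 : Int) : Prop :=
  1 ≤ height ∧ height ≤ height2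
instance (width : Int) (height : Int) (brick : String) (astring : String) (height2 : Int) : Decidable (Pre_build_building width height brick astring height2) := by unfold Pre_build_building; infer_instance

def pvWitness_build_building : Int × Int × String × String × Int := (3, 2, "x", "", 4)

def Spec_build_building (width : Int) (height : Int) (brick : String) (astring : String) (height2 : Int) (out : String) : Prop := out = build_building_alt width height brick astring height2
instance (width : Int) (height : Int) (brick : String) (astring : String) (height2 : Int) (out : String) : Decidable (Spec_build_building width height brick astring height2 out) := by unfold Spec_build_building; infer_instance

-- ===== CLAIM (what is proved, stated in full; the proofs are below) =====
def Claim_equal_build_building : Prop := ∀ (width : Int) (height : Int) (brick : String) (astring : String) (height2 : Int), Dom_build_building width height brick astring height2 → Pre_build_building width height brick astring height2 → Spec_build_building width height brick astring height2 (build_building width height brick astring height2)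


-- ===== LEMMAS AND PROOFS =====

lemma join_cons_of_ne_nil (a : List Char) (l : List (List Char)) (h : l ≠ []) :
    PySem.Chars.join ['\n'] (a :: l) = a ++ ['\n'] ++ PySem.Chars.join ['\n'] l := by
  cases l with
  | nil => exact absurd rfl h
  | cons b t => rw [PySem.Chars.join_cons_cons]

lemma bbAgo_eq (width : Int) (brick : List Char) :
    ∀ (fuel : Nat) (h h2 : Int) (acc : List Char), 1 ≤ h → h ≤ h2 → h2.toNat ≤ fuel →
      bbAgo fuel width h brick acc h2 =
        acc ++ PySem.Chars.join ['\n']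
          (List.replicate (h2 - h).toNat (PySem.List.pyRepeat [' '] width)
            ++ List.replicate h.toNat (PySem.List.pyRepeat brick width)) := by
  intro fuel
  induction fuel with
  | zero => intro h h2 acc h1 hle hf; omega
  | succ f ih =>
    intro h h2 acc h1 hle hf
    by_cases hne : h = h2
    · subst hne
      by_cases hone : h = 1
      · subst hone
        simp [bbAgo, PySem.Chars.join_singleton]
      · have h2ge : 2 ≤ h := by omega
        rw [bbAgo]
        simp only [if_neg (by omega : ¬ h ≠ h), if_neg hone]
        rw [ih (h - 1) (h - 1) _ (by omega) le_rfl (by omega)]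
        have hrep : h.toNat = (h - 1).toNat + 1 := by omega
        rw [show (h - h).toNat = 0 by omega, show (h - 1 - (h - 1)).toNat = 0 by omega]
        simp only [List.replicate_zero, List.nil_append]
        rw [hrep, List.replicate_succ,
          join_cons_of_ne_nil _ _ (by simp [List.replicate_eq_nil_iff]; omega)]
        simp [List.append_assoc]
    · have hlt : h < h2 := lt_of_le_of_ne hle hne
      rw [bbAgo]
      simp only [if_pos (by exact fun e => hne e : h ≠ h2)]
      rw [ih h (h2 - 1) _ h1 (by omega) (by omega)]
      have hrep : (h2 - h).toNat = (h2 - 1 - h).toNat + 1 := by omega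
      rw [hrep, List.replicate_succ, List.cons_append,
        join_cons_of_ne_nil _ _ (by
          simp only [ne_eq, List.append_eq_nil_iff, not_and]
          intro _; simp [List.replicate_eq_nil_iff]; omega)]
      simp [List.append_assoc]

-- ===== VERDICT (by name: the statement is the Claim_ definition above) =====
theorem build_building_spec : Claim_equal_build_building := by
  intro width height brick astring height2 _ hpre
  obtain ⟨h1, hle⟩ := hpre
  unfold Spec_build_building build_building build_building_alt
  rw [if_neg (by omega : ¬ (height < 1 ∨ height > height2)),
    bbAgo_eq width brick.toList height2.toNat height height2 astring.toList h1 hle le_rfl]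
  simp [PySem.List.pyRepeat_singleton]
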